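-- pv_equiv track=rewrite | github.com/ivanneto02/advent-of-code | 2024/day2/main.py | removeOneAndCheck
-- ===== SOURCE A (Python) =====
-- def removeOneAndCheck(nums):
--     for i in range(0, len(nums)):
--         newNums = [ nums[j] for j in range(0, len(nums)) if i != j ]
--         test1 = all(l < r for l,r in zip(newNums, newNums[1:])) # inc
--         test2 = all(l > r for l,r in zip(newNums, newNums[1:])) # dec
--         test3 = all( (abs(r - l) <= 3 and abs(r - l) >= 1) for l,r in zip(newNums, newNums[1:]))
--         if ((test1 or test2) and test3): return 1
--
--     return 0
-- ===== SOURCE B (Python) =====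
-- def removeOneAndCheck(nums):
--     n = len(nums)
--     if n <= 2:
--         return 1 if n >= 1 else 0
--     d = [nums[k + 1] - nums[k] for k in range(n - 1)]
--     m = n - 1
--     for s in (1, -1):
--         def ok(x):
--             return 1 <= s * x <= 3
--         # longest ok prefix of d, and start of longest ok suffix of d
--         p = next((k for k, x in enumerate(d) if not ok(x)), m)
--         q = m - next((k for k, x in enumerate(reversed(d)) if not ok(x)), m)
--         if p >= m - 1 or q <= 1:
--             return 1  # dropping the last or the first element works
--         # only removals bridging the violation can work: i in [q-1, p+1]
--         for i in range(max(1, q - 1), min(n - 1, p + 2)):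
--             if i - 1 <= p and i + 1 >= q and ok(d[i - 1] + d[i]):
--                 return 1
--     return 0
-- ===== Notes on version B (the rewrite author's own statement) =====
-- stated objective: faster
-- what changed: A rebuilds the list and re-runs three full pairwise scans for every candidate removal (O(n^2)); B builds the difference list once and, per direction, finds the longest valid prefix and suffix in one scan, then tests only the O(1) removals that can bridge the first violation (O(n)).
import Mathlib
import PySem

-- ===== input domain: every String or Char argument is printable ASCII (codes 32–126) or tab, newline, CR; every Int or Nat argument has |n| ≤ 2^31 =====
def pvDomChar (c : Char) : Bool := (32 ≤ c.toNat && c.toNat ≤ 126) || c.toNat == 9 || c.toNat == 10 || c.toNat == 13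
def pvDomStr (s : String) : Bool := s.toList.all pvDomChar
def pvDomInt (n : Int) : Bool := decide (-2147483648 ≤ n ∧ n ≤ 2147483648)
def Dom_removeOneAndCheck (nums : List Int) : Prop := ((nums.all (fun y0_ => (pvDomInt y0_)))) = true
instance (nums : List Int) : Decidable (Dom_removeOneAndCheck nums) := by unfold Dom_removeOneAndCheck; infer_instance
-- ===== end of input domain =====

-- B replaces A's O(n^2) try-every-removal scan by an O(n) scan: it finds the longest
-- valid prefix and suffix of the difference list and tests only the O(1) removals that
-- can bridge the first violation.

-- ===== PORT A =====
-- the body of A's loop for a given i: build newNums = nums with index i removed, run the three all() tests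
def pvTestA (nums : List Int) (i : Nat) : Bool :=
  let n := nums.length
  let newNums := ((List.range n).filter (fun j => i ≠ j)).map (fun j => nums.getD j 0)  -- indices j < n are always in range
  let pairs := newNums.zip (newNums.drop 1)   -- zip(newNums, newNums[1:]); [1:] on a list = drop 1
  let test1 := pairs.all (fun p => decide (p.1 < p.2))
  let test2 := pairs.all (fun p => decide (p.1 > p.2))
  let test3 := pairs.all (fun p => decide (|p.2 - p.1| ≤ 3) && decide (|p.2 - p.1| ≥ 1))
  (test1 || test2) && test3

-- for i in range(0, len(nums)): ... early return 1, else fall through to 0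
def pvLoopA (nums : List Int) (i : Nat) : Int :=
  if _h : i < nums.length then
    (if pvTestA nums i then 1 else pvLoopA nums (i + 1))
  else 0
termination_by nums.length - i

def removeOneAndCheck (nums : List Int) : Int := pvLoopA nums 0

-- ===== PORT B =====
def pvOkB (s x : Int) : Bool := decide (1 ≤ s * x) && decide (s * x ≤ 3)

-- one direction s ∈ {1,-1}: p = first bad index of d (m if none), q = m - first bad index of reversed d
def pvDirB (s : Int) (d : List Int) (m n : Nat) : Bool :=
  let p := d.findIdx (fun x => ! pvOkB s x)            -- next((k for k,x in enumerate(d) if not ok(x)), m)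
  let q := m - d.reverse.findIdx (fun x => ! pvOkB s x)
  if p ≥ m - 1 || q ≤ 1 then true
  else (List.range' (max 1 (q - 1)) (min (n - 1) (p + 2) - max 1 (q - 1))).any
        (fun i => decide (i - 1 ≤ p) && decide (i + 1 ≥ q) && pvOkB s (d.getD (i - 1) 0 + d.getD i 0))

def removeOneAndCheck_alt (nums : List Int) : Int :=
  let n := nums.length
  if n ≤ 2 then (if n ≥ 1 then 1 else 0)
  else
    let d := (List.range (n - 1)).map (fun k => nums.getD (k + 1) 0 - nums.getD k 0)
    let m := n - 1
    if pvDirB 1 d m n then 1 else if pvDirB (-1) d m n then 1 else 0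

-- ===== PRECONDITION & SPEC =====
def Spec_removeOneAndCheck (nums : List Int) (out : Int) : Prop := out = removeOneAndCheck_alt nums
instance (nums : List Int) (out : Int) : Decidable (Spec_removeOneAndCheck nums out) := by unfold Spec_removeOneAndCheck; infer_instance

-- ===== CLAIM (what is proved, stated in full; the proofs are below) =====
def Claim_equal_removeOneAndCheck : Prop := ∀ (nums : List Int), Dom_removeOneAndCheck nums → Spec_removeOneAndCheck nums (removeOneAndCheck nums)

-- ===== LEMMAS AND PROOFS =====

-- difference list of a sequence
def pvDiffs (xs : List Int) : List Int := List.zipWith (fun a b => b - a) xs (xs.drop 1)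

-- reading every index of a list back yields the list
theorem pv_map_getD_range (xs : List Int) :
    (List.range xs.length).map (fun j => xs.getD j 0) = xs := by
  induction xs with
  | nil => simp
  | cons a t ih =>
    rw [List.length_cons, List.range_succ_eq_map, List.map_cons, List.map_map]
    simpa using ih

-- the comprehension [nums[j] for j in range(n) if i != j] is eraseIdx
theorem pv_newNums_eq (nums : List Int) (i : Nat) :
    ((List.range nums.length).filter (fun j => i ≠ j)).map (fun j => nums.getD j 0)
      = nums.eraseIdx i := by
  induction nums generalizing i with
  | nil => simp
  | cons a t ih =>
    rw [List.length_cons, List.range_succ_eq_map]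
    cases i with
    | zero =>
      rw [List.eraseIdx_cons_zero, List.filter_cons]
      simp only [ne_eq, decide_not, decide_true, Bool.not_true, Bool.false_eq_true, if_false,
        List.filter_map]
      have hfil : (List.range t.length).filter ((fun j => !decide ((0:Nat) = j)) ∘ Nat.succ)
          = List.range t.length := by
        apply List.filter_eq_self.mpr
        intro x _
        simp
      rw [hfil, List.map_map]
      simpa using pv_map_getD_range t
    | succ i' =>
      rw [List.eraseIdx_cons_succ, List.filter_cons]
      have h0 : (decide ¬(i' + 1 = 0)) = true := by simp
      simp only [ne_eq, h0, if_pos, List.map_cons, List.getD_cons_zero, List.filter_map]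
      have hfil : (List.range t.length).filter ((fun j => decide ¬(i' + 1 = j)) ∘ Nat.succ)
          = (List.range t.length).filter (fun j => decide ¬(i' = j)) := by
        apply List.filter_congr
        intro x _
        simp [Nat.succ_eq_add_one]
      rw [hfil, List.map_map]
      have := ih i'
      simp only [ne_eq] at this
      rw [List.cons_inj_right]
      simpa using this

theorem pv_tests_combine (s : Int) (cmp : Int → Int → Bool)
    (h : ∀ a b : Int, (cmp a b && (decide (|b - a| ≤ 3) && decide (|b - a| ≥ 1))) = pvOkB s (b - a))
    (ys : List Int) :
    ((ys.zip (ys.drop 1)).all (fun p => cmp p.1 p.2)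
      && (ys.zip (ys.drop 1)).all (fun p => decide (|p.2 - p.1| ≤ 3) && decide (|p.2 - p.1| ≥ 1)))
      = (pvDiffs ys).all (pvOkB s) := by
  induction ys with
  | nil => rfl
  | cons a t ih =>
    cases t with
    | nil => rfl
    | cons b u =>
      have hz : ((a :: b :: u).zip ((a :: b :: u).drop 1)) = (a, b) :: ((b :: u).zip ((b :: u).drop 1)) := rfl
      have hdz : pvDiffs (a :: b :: u) = (b - a) :: pvDiffs (b :: u) := rfl
      rw [hz, hdz, List.all_cons, List.all_cons, List.all_cons, ← ih, ← h a b]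
      cases cmp a b <;> cases (b :: u).zip ((b :: u).drop 1) |>.all (fun p => cmp p.1 p.2) <;>
        cases decide (|b - a| ≤ 3) <;> cases decide (|b - a| ≥ 1) <;>
        cases (b :: u).zip ((b :: u).drop 1) |>.all (fun p => decide (|p.2 - p.1| ≤ 3) && decide (|p.2 - p.1| ≥ 1)) <;> rfl

theorem pv_cmp_lt (a b : Int) :
    (decide (a < b) && (decide (|b - a| ≤ 3) && decide (|b - a| ≥ 1))) = pvOkB 1 (b - a) := by
  simp only [pvOkB, ← Bool.decide_and, decide_eq_decide]
  rcases abs_cases (b - a) with ⟨he, h0⟩ | ⟨he, h0⟩ <;> rw [he] <;> omega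

theorem pv_cmp_gt (a b : Int) :
    (decide (a > b) && (decide (|b - a| ≤ 3) && decide (|b - a| ≥ 1))) = pvOkB (-1) (b - a) := by
  simp only [pvOkB, ← Bool.decide_and, decide_eq_decide]
  rcases abs_cases (b - a) with ⟨he, h0⟩ | ⟨he, h0⟩ <;> rw [he] <;> omega

theorem pv_combine_lt (ys : List Int) :
    ((ys.zip (ys.drop 1)).all (fun p => decide (p.1 < p.2))
      && (ys.zip (ys.drop 1)).all (fun p => decide (|p.2 - p.1| ≤ 3) && decide (|p.2 - p.1| ≥ 1)))
      = (pvDiffs ys).all (pvOkB 1) := pv_tests_combine 1 _ pv_cmp_lt ys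

theorem pv_combine_gt (ys : List Int) :
    ((ys.zip (ys.drop 1)).all (fun p => decide (p.1 > p.2))
      && (ys.zip (ys.drop 1)).all (fun p => decide (|p.2 - p.1| ≤ 3) && decide (|p.2 - p.1| ≥ 1)))
      = (pvDiffs ys).all (pvOkB (-1)) := pv_tests_combine (-1) _ pv_cmp_gt ys

-- the two all-tests combine into the per-direction diff test
theorem pv_testA_eq (nums : List Int) (i : Nat) :
    pvTestA nums i = ((pvDiffs (nums.eraseIdx i)).all (pvOkB 1)
                      || (pvDiffs (nums.eraseIdx i)).all (pvOkB (-1))) := by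
  have hnn := pv_newNums_eq nums i
  simp only [pvTestA]
  rw [hnn, ← pv_combine_lt, ← pv_combine_gt]
  have hdistr : ∀ x y z : Bool, ((x || y) && z) = ((x && z) || (y && z)) := by decide
  apply hdistr

-- B's d is the diff list
theorem pv_d_eq (nums : List Int) :
    (List.range (nums.length - 1)).map (fun k => nums.getD (k + 1) 0 - nums.getD k 0)
      = pvDiffs nums := by
  induction nums with
  | nil => simp [pvDiffs]
  | cons a t ih =>
    cases t with
    | nil => simp [pvDiffs]
    | cons b u =>
      simp only [List.length_cons, Nat.add_sub_cancel, List.range_succ_eq_map, List.map_cons,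
        List.map_map]
      simp only [List.getD_cons_zero, List.getD_cons_succ]
      have ih' := ih
      simp only [List.length_cons, Nat.add_sub_cancel] at ih'
      rw [show pvDiffs (a :: b :: u) = (b - a) :: pvDiffs (b :: u) from rfl]
      rw [List.cons_inj_right, ← ih']
      rfl

-- A's loop returns 1 iff some later index passes the test
theorem pv_loopA_one_iff (nums : List Int) (i : Nat) :
    pvLoopA nums i = 1 ↔ ∃ k, i ≤ k ∧ k < nums.length ∧ pvTestA nums k = true := by
  induction i using pvLoopA.induct nums with
  | case1 i h ht =>
    rw [pvLoopA, dif_pos h, if_pos ht]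
    exact ⟨fun _ => ⟨i, le_refl _, h, ht⟩, fun _ => rfl⟩
  | case2 i h ht ih =>
    rw [pvLoopA, dif_pos h, if_neg ht]
    rw [ih]
    constructor
    · rintro ⟨k, hk1, hk2, hk3⟩; exact ⟨k, by omega, hk2, hk3⟩
    · rintro ⟨k, hk1, hk2, hk3⟩
      refine ⟨k, ?_, hk2, hk3⟩
      rcases Nat.eq_or_lt_of_le hk1 with h' | h'
      · exact absurd (h' ▸ hk3) (by simpa using ht)
      · omega
  | case3 i h =>
    rw [pvLoopA, dif_neg h]
    constructor
    · intro h'; exact absurd h' (by norm_num)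
    · rintro ⟨k, hk1, hk2, _⟩; omega

theorem pv_loopA_zero_or_one (nums : List Int) (i : Nat) :
    pvLoopA nums i = 0 ∨ pvLoopA nums i = 1 := by
  induction i using pvLoopA.induct nums with
  | case1 i h ht => rw [pvLoopA, dif_pos h, if_pos ht]; right; rfl
  | case2 i h ht ih => rw [pvLoopA, dif_pos h, if_neg ht]; exact ih
  | case3 i h => rw [pvLoopA, dif_neg h]; left; rfl

-- diff list of eraseIdx: the three shapes
theorem pv_diffs_erase_zero (xs : List Int) :
    pvDiffs (xs.eraseIdx 0) = (pvDiffs xs).drop 1 := by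
  cases xs with
  | nil => rfl
  | cons a t =>
    cases t with
    | nil => rfl
    | cons b u => rfl

theorem pv_diffs_erase_last (xs : List Int) (h : 1 ≤ xs.length) :
    pvDiffs (xs.eraseIdx (xs.length - 1)) = (pvDiffs xs).take (xs.length - 2) := by
  induction xs with
  | nil => rfl
  | cons a t ih =>
    cases t with
    | nil => rfl
    | cons b u =>
      cases u with
      | nil => rfl
      | cons c v =>
        have h1 : (a :: b :: c :: v).length - 1 = (b :: c :: v).length - 1 + 1 := by
          simp
        rw [h1, List.eraseIdx_cons_succ]
        have hh : (b :: c :: v).eraseIdx ((b :: c :: v).length - 1)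
            = b :: (c :: v).eraseIdx ((c :: v).length - 1) := by
          simp [List.eraseIdx_cons_succ]
        have ih' := ih (by simp)
        rw [hh] at ih' ⊢
        have hdz : pvDiffs (a :: b :: (c :: v).eraseIdx ((c :: v).length - 1))
            = (b - a) :: pvDiffs (b :: (c :: v).eraseIdx ((c :: v).length - 1)) := rfl
        rw [hdz, ih']
        have hdz2 : pvDiffs (a :: b :: c :: v) = (b - a) :: pvDiffs (b :: c :: v) := rfl
        rw [hdz2]
        have hl : (a :: b :: c :: v).length - 2 = ((b :: c :: v).length - 2) + 1 := by simp
        rw [hl, List.take_succ_cons]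

theorem pv_diffs_erase_mid (xs : List Int) (i : Nat) (h0 : 0 < i) (h1 : i < xs.length - 1) :
    pvDiffs (xs.eraseIdx i)
      = (pvDiffs xs).take (i - 1)
        ++ ((pvDiffs xs).getD (i - 1) 0 + (pvDiffs xs).getD i 0) :: (pvDiffs xs).drop (i + 1) := by
  induction i generalizing xs with
  | zero => omega
  | succ i' ih =>
    match xs, h1 with
    | a :: b :: c :: v, h1 =>
      cases Nat.eq_zero_or_pos i' with
      | inl hz =>
        subst hz
        have : (a :: b :: c :: v).eraseIdx 1 = a :: c :: v := rfl
        rw [this]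
        have hdz : pvDiffs (a :: c :: v) = (c - a) :: pvDiffs (c :: v) := rfl
        have hdz2 : pvDiffs (a :: b :: c :: v) = (b - a) :: (c - b) :: pvDiffs (c :: v) := rfl
        rw [hdz, hdz2]
        simp
      | inr hpos =>
        have h1' : i' < (b :: c :: v).length - 1 := by simp at h1 ⊢; omega
        have ih' := ih (b :: c :: v) hpos h1'
        have he : (a :: b :: c :: v).eraseIdx (i' + 1) = a :: ((b :: c :: v).eraseIdx i') := rfl
        rw [he]
        have hhead : ∃ w, (b :: c :: v).eraseIdx i' = b :: w := by
          match i', hpos with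
          | j + 1, _ => exact ⟨(c :: v).eraseIdx j, rfl⟩
        obtain ⟨w, hw⟩ := hhead
        rw [hw]
        have hdz : pvDiffs (a :: b :: w) = (b - a) :: pvDiffs (b :: w) := rfl
        rw [hdz, ← hw, ih']
        have hdz2 : pvDiffs (a :: b :: c :: v) = (b - a) :: pvDiffs (b :: c :: v) := rfl
        rw [hdz2]
        have h2 : i' + 1 - 1 = (i' - 1) + 1 := by omega
        rw [h2, List.take_succ_cons]
        simp only [List.cons_append, List.getD_cons_succ, List.drop_succ_cons]

-- findIdx as longest-ok prefix
theorem pv_take_all_iff (ok : Int → Bool) (d : List Int) (k : Nat) :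
    ((d.take k).all ok = true) ↔ min k d.length ≤ d.findIdx (fun x => ! ok x) := by
  induction d generalizing k with
  | nil => simp
  | cons a t ih =>
    cases k with
    | zero => simp
    | succ k' =>
      rw [List.take_succ_cons, List.all_cons, List.findIdx_cons]
      cases hok : ok a with
      | true =>
        simp only [Bool.not_true, Bool.true_and, cond_false]
        rw [ih]
        simp
      | false =>
        simp only [Bool.not_false, Bool.false_and, cond_true]
        simp

theorem pv_drop_all_iff (ok : Int → Bool) (d : List Int) (k : Nat) :
    ((d.drop k).all ok = true) ↔ d.length - d.reverse.findIdx (fun x => ! ok x) ≤ k := by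
  have h1 : (d.drop k).all ok = (d.drop k).reverse.all ok := by rw [List.all_reverse]
  rw [h1, List.reverse_drop, pv_take_all_iff]
  have h2 := List.findIdx_le_length (p := fun x => ! ok x) (xs := d.reverse)
  simp only [List.length_reverse] at *
  omega

-- pvDirB unfolded into the three ways a removal can succeed
theorem pv_dirB_iff (s : Int) (d : List Int) (n : Nat) :
    pvDirB s d (n - 1) n = true ↔
      (n - 1 - 1 ≤ d.findIdx (fun x => ! pvOkB s x)
       ∨ (n - 1) - d.reverse.findIdx (fun x => ! pvOkB s x) ≤ 1
       ∨ ∃ i, 1 ≤ i ∧ i < n - 1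
           ∧ i - 1 ≤ d.findIdx (fun x => ! pvOkB s x)
           ∧ (n - 1) - d.reverse.findIdx (fun x => ! pvOkB s x) ≤ i + 1
           ∧ pvOkB s (d.getD (i - 1) 0 + d.getD i 0) = true) := by
  simp only [pvDirB]
  split_ifs with hcond
  · simp only [Bool.or_eq_true, decide_eq_true_eq, ge_iff_le] at hcond
    refine iff_of_true rfl ?_
    rcases hcond with h | h
    · exact Or.inl h
    · exact Or.inr (Or.inl h)
  · simp only [Bool.or_eq_true, decide_eq_true_eq, ge_iff_le, not_or] at hcond
    obtain ⟨hc1, hc2⟩ := hcond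
    rw [List.any_eq_true]
    constructor
    · rintro ⟨i, hi, hcondi⟩
      rw [List.mem_range'_1] at hi
      simp only [Bool.and_eq_true, decide_eq_true_eq, ge_iff_le] at hcondi
      obtain ⟨⟨ha1, ha2⟩, ha3⟩ := hcondi
      exact Or.inr (Or.inr ⟨i, by omega, by omega, ha1, ha2, ha3⟩)
    · rintro (h | h | ⟨i, h1, h2, hip, hiq, hok⟩)
      · exact absurd h hc1
      · exact absurd h hc2
      · refine ⟨i, ?_, ?_⟩
        · rw [List.mem_range'_1]
          omega
        · simp only [Bool.and_eq_true, decide_eq_true_eq, ge_iff_le]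
          exact ⟨⟨hip, hiq⟩, hok⟩

-- per direction, for n ≥ 3: some removal works ↔ pvDirB
theorem pv_dir_iff (s : Int) (nums : List Int) (h3 : 3 ≤ nums.length) :
    (∃ k, k < nums.length ∧ (pvDiffs (nums.eraseIdx k)).all (pvOkB s) = true)
      ↔ pvDirB s (pvDiffs nums) (nums.length - 1) nums.length = true := by
  have hdl : (pvDiffs nums).length = nums.length - 1 := by simp [pvDiffs]
  have hple := List.findIdx_le_length (p := fun x => ! pvOkB s x) (xs := pvDiffs nums)
  have hrle := List.findIdx_le_length (p := fun x => ! pvOkB s x) (xs := (pvDiffs nums).reverse)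
  rw [List.length_reverse] at hrle
  rw [pv_dirB_iff s (pvDiffs nums) nums.length]
  -- characterizations of the three removal shapes
  have hch0 : ((pvDiffs (nums.eraseIdx 0)).all (pvOkB s) = true)
      ↔ (nums.length - 1) - (pvDiffs nums).reverse.findIdx (fun x => ! pvOkB s x) ≤ 1 := by
    rw [pv_diffs_erase_zero, pv_drop_all_iff, hdl]
  have hchlast : ((pvDiffs (nums.eraseIdx (nums.length - 1))).all (pvOkB s) = true)
      ↔ nums.length - 1 - 1 ≤ (pvDiffs nums).findIdx (fun x => ! pvOkB s x) := by
    rw [pv_diffs_erase_last nums (by omega), pv_take_all_iff, hdl]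
    omega
  have hchmid : ∀ i, 0 < i → i < nums.length - 1 →
      (((pvDiffs (nums.eraseIdx i)).all (pvOkB s) = true)
        ↔ (i - 1 ≤ (pvDiffs nums).findIdx (fun x => ! pvOkB s x)
           ∧ (nums.length - 1) - (pvDiffs nums).reverse.findIdx (fun x => ! pvOkB s x) ≤ i + 1
           ∧ pvOkB s ((pvDiffs nums).getD (i - 1) 0 + (pvDiffs nums).getD i 0) = true)) := by
    intro i hi0 hi1
    rw [pv_diffs_erase_mid nums i hi0 hi1, List.all_append, List.all_cons,
      Bool.and_eq_true, Bool.and_eq_true, pv_take_all_iff, pv_drop_all_iff, hdl]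
    constructor
    · rintro ⟨h1, h2, h3'⟩
      exact ⟨by omega, by omega, h2⟩
    · rintro ⟨h1, h2, h3'⟩
      exact ⟨by omega, h3', by omega⟩
  constructor
  · rintro ⟨k, hk, hall⟩
    by_cases hk0 : k = 0
    · subst hk0
      exact Or.inr (Or.inl (hch0.mp hall))
    · by_cases hklast : k = nums.length - 1
      · subst hklast
        exact Or.inl (hchlast.mp hall)
      · obtain ⟨h1, h2, h3'⟩ := (hchmid k (by omega) (by omega)).mp hall
        exact Or.inr (Or.inr ⟨k, by omega, by omega, h1, h2, h3'⟩)
  · rintro (h | h | ⟨i, h1, h2, hip, hiq, hok⟩)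
    · exact ⟨nums.length - 1, by omega, hchlast.mpr h⟩
    · exact ⟨0, by omega, hch0.mpr h⟩
    · exact ⟨i, by omega, (hchmid i (by omega) (by omega)).mpr ⟨hip, hiq, hok⟩⟩

-- ===== VERDICT (by name: the statement is the Claim_ definition above) =====
-- a list with at most one element has no adjacent pairs
theorem pv_diffs_short (ys : List Int) (h : ys.length ≤ 1) : pvDiffs ys = [] := by
  match ys, h with
  | [], _ => rfl
  | [x], _ => rfl

theorem removeOneAndCheck_spec : Claim_equal_removeOneAndCheck := by
  intro nums _
  unfold Spec_removeOneAndCheck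
  by_cases hn : nums.length ≤ 2
  · -- 0, 1 or 2 elements
    by_cases hz : nums.length = 0
    · have hnil : nums = [] := List.length_eq_zero_iff.mp hz
      subst hnil
      rw [removeOneAndCheck, pvLoopA]
      simp [removeOneAndCheck_alt]
    · have hA : pvLoopA nums 0 = 1 := by
        refine (pv_loopA_one_iff nums 0).mpr ⟨0, le_refl 0, by omega, ?_⟩
        rw [pv_testA_eq]
        have hd : pvDiffs (nums.eraseIdx 0) = [] := by
          refine pv_diffs_short _ ?_
          simp
          omega
        rw [hd]
        rfl
      rw [removeOneAndCheck, hA]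
      simp only [removeOneAndCheck_alt]
      rw [if_pos hn, if_pos (by omega)]
  · have h3 : 3 ≤ nums.length := by omega
    have hA1 : removeOneAndCheck nums = 1 ↔ (∃ k, k < nums.length ∧ pvTestA nums k = true) := by
      rw [removeOneAndCheck, pv_loopA_one_iff]
      constructor
      · rintro ⟨k, _, hk2, hk3⟩; exact ⟨k, hk2, hk3⟩
      · rintro ⟨k, hk2, hk3⟩; exact ⟨k, by omega, hk2, hk3⟩
    have hExists : (∃ k, k < nums.length ∧ pvTestA nums k = true)
        ↔ ((pvDirB 1 (pvDiffs nums) (nums.length - 1) nums.length = true)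
           ∨ (pvDirB (-1) (pvDiffs nums) (nums.length - 1) nums.length = true)) := by
      rw [← pv_dir_iff 1 nums h3, ← pv_dir_iff (-1) nums h3]
      constructor
      · rintro ⟨k, hk, ht⟩
        rw [pv_testA_eq, Bool.or_eq_true] at ht
        rcases ht with h | h
        · exact Or.inl ⟨k, hk, h⟩
        · exact Or.inr ⟨k, hk, h⟩
      · rintro (⟨k, hk, h⟩ | ⟨k, hk, h⟩)
        · exact ⟨k, hk, by rw [pv_testA_eq, Bool.or_eq_true]; exact Or.inl h⟩
        · exact ⟨k, hk, by rw [pv_testA_eq, Bool.or_eq_true]; exact Or.inr h⟩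
    have hB : removeOneAndCheck_alt nums
        = (if pvDirB 1 (pvDiffs nums) (nums.length - 1) nums.length then 1
           else if pvDirB (-1) (pvDiffs nums) (nums.length - 1) nums.length then 1 else 0) := by
      simp only [removeOneAndCheck_alt]
      rw [if_neg (by omega), pv_d_eq]
    rw [hB]
    by_cases hb1 : pvDirB 1 (pvDiffs nums) (nums.length - 1) nums.length = true
    · rw [if_pos hb1]
      exact hA1.mpr (hExists.mpr (Or.inl hb1))
    · by_cases hb2 : pvDirB (-1) (pvDiffs nums) (nums.length - 1) nums.length = true
      · rw [if_neg hb1, if_pos hb2]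
        exact hA1.mpr (hExists.mpr (Or.inr hb2))
      · rw [if_neg hb1, if_neg hb2]
        rcases pv_loopA_zero_or_one nums 0 with h0 | h1'
        · exact h0
        · exact absurd (hExists.mp (hA1.mp h1')) (by simp [hb1, hb2])
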